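-- pv_equiv track=rewrite | github.com/shicks255/CodeWars_Python | Code_Wars/Kata_Remove_The_Minimum/solution.py | remove_smallest2
-- ===== SOURCE A (Python) =====
-- def remove_smallest2(numbers):
--     if len(numbers) == 0:
--         return []
--     min = None
--     for i,x in enumerate(numbers):
--         if min is None or x < numbers[min]:
--             min = i;
--
--     newList = numbers[:]
--     newList.pop(min)
--     return newList
-- ===== SOURCE B (Python) =====
-- def remove_smallest2(numbers):
--     before = []   # output elements that precede the withheld minimum
--     after = []    # output elements that follow it
--     m = None      # the withheld minimum (first occurrence so far)
--     for x in numbers: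
--         if m is None:
--             m = x
--         elif x < m:
--             before.append(m)   # old minimum rejoins the output at its place
--             before.extend(after)
--             after = []
--             m = x
--         else:
--             after.append(x)
--     return before + after
-- ===== Notes on version B (the rewrite author's own statement) =====
-- stated objective: alternative
-- what changed: Instead of locating the minimum's index and popping it from a copy, B makes one forward pass that maintains the partial output directly as two lists around a withheld running minimum: when a strictly smaller element arrives, the old minimum and its followers rejoin the output and the new element is withheld; no index, min(), pop or slicing is used.
import Mathlib
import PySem

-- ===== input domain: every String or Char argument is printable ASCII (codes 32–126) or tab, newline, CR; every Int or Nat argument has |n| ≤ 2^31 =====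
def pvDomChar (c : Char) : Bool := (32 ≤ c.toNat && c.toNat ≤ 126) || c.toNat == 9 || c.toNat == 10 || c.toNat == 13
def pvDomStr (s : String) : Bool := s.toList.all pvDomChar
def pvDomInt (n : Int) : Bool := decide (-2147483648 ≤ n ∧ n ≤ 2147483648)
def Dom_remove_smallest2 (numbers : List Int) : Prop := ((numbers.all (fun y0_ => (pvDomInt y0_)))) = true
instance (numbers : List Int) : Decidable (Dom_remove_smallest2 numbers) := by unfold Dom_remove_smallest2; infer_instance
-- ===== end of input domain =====

-- B replaces A's index-tracking scan plus copy/pop with a single pass that maintains the partial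
-- output directly around a withheld running minimum (alternative decomposition; same O(n) cost).

-- ===== PORT A =====
def remove_smallest2 (numbers : List Int) : List Int :=
  if numbers.length == 0 then []
  else
    -- the for-loop: running index 'min' of the smallest element seen so far
    let m := (PySem.List.enumerate numbers 0).foldl
      (fun (mn : Option Int) (p : Int × Int) =>
        match mn with
        | none => some p.1
        | some j => if p.2 < PySem.List.pyGetD numbers j 0 then some p.1 else mn)
      none
    match m with
    | none => []         -- unreachable: numbers is nonempty, so the loop ran
    | some j =>
      match PySem.List.pop? numbers j with
      | none => []       -- unreachable: j is a valid index
      | some r => r.2    -- newList after newList.pop(min)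

-- ===== PORT B =====
-- loop body of Source B, named: state is (before, after, m)
def pvStepB (st : List Int × List Int × Option Int) (x : Int) :
    List Int × List Int × Option Int :=
  match st with
  | (before, after, none) => (before, after, some x)
  | (before, after, some m) =>
      if x < m then (before ++ [m] ++ after, [], some x)
      else (before, after ++ [x], some m)

def remove_smallest2_alt (numbers : List Int) : List Int :=
  let s := numbers.foldl pvStepB ([], [], none)
  s.1 ++ s.2.1          -- before + after

-- ===== PRECONDITION & SPEC =====
def Spec_remove_smallest2 (numbers : List Int) (out : List Int) : Prop := out = remove_smallest2_alt numbers
instance (numbers : List Int) (out : List Int) : Decidable (Spec_remove_smallest2 numbers out) := by unfold Spec_remove_smallest2; infer_instance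

-- ===== CLAIM (what is proved, stated in full; the proofs are below) =====
def Claim_equal_remove_smallest2 : Prop := ∀ (numbers : List Int), Dom_remove_smallest2 numbers → Spec_remove_smallest2 numbers (remove_smallest2 numbers)

-- ===== LEMMAS AND PROOFS =====

-- Abstract form of A's loop: running first-strict-minimum index over (index, value) pairs.
def pvChoose (j v : Int) : List (Int × Int) → Int
  | [] => j
  | (i, x) :: ps => if x < v then pvChoose i x ps else pvChoose j v ps

-- A's foldl equals pvChoose once each pair (i, x) really satisfies numbers[i] = x.
lemma pv_fold_eq_choose (c : List Int) (ps : List (Int × Int)) : ∀ (j v : Int),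
    PySem.List.pyGetD c j 0 = v → (∀ p ∈ ps, PySem.List.pyGetD c p.1 0 = p.2) →
    ps.foldl
      (fun (mn : Option Int) (p : Int × Int) =>
        match mn with
        | none => some p.1
        | some j => if p.2 < PySem.List.pyGetD c j 0 then some p.1 else mn)
      (some j)
      = some (pvChoose j v ps) := by
  induction ps with
  | nil => intro j v _ _; rfl
  | cons p ps ih =>
      intro j v hv hall
      obtain ⟨i, x⟩ := p
      simp only [List.foldl_cons, pvChoose]
      have hx : PySem.List.pyGetD c i 0 = x := hall (i, x) (by simp)
      have hrest : ∀ q ∈ ps, PySem.List.pyGetD c q.1 0 = q.2 :=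
        fun q hq => hall q (by simp [hq])
      rw [hv]
      by_cases hlt : x < v
      · rw [if_pos hlt, if_pos hlt]
        exact ih i x hx hrest
      · rw [if_neg hlt, if_neg hlt]
        exact ih j v hv hrest

-- foldl min over a list all of whose elements are ≥ a is a.
lemma pv_foldl_min_of_le (xs : List Int) (a : Int) (h : ∀ y ∈ xs, a ≤ y) :
    xs.foldl min a = a := by
  rcases PySem.List.foldl_min_mem xs a with he | hm
  · exact he
  · exact le_antisymm (PySem.List.foldl_min_le xs a).1 (h _ hm)

-- foldl min over a list containing an element < a is < a.
lemma pv_foldl_min_of_lt (xs : List Int) (a : Int) (h : ¬ ∀ y ∈ xs, a ≤ y) :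
    xs.foldl min a < a := by
  simp only [not_forall, not_le, exists_prop] at h
  obtain ⟨y, hy, hlt⟩ := h
  exact lt_of_le_of_lt ((PySem.List.foldl_min_le xs a).2 y hy) hlt

-- pvChoose over enumerate computes the first index of the minimum.
lemma pv_choose_enum (xs : List Int) : ∀ (s : Int) (j v : Int),
    pvChoose j v (PySem.List.enumerate xs s) =
      if ∀ y ∈ xs, v ≤ y then j else s + (xs.idxOf (xs.foldl min v) : Int) := by
  induction xs with
  | nil => intro s j v; simp [PySem.List.enumerate, pvChoose]
  | cons x xs ih =>
      intro s j v
      rw [PySem.List.enumerate_cons]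
      simp only [pvChoose]
      by_cases hlt : x < v
      · rw [if_pos hlt, ih]
        have hcond : ¬ ∀ y ∈ x :: xs, v ≤ y := by
          intro h; exact absurd (h x (by simp)) (not_le.mpr hlt)
        rw [if_neg hcond]
        have hfold : (x :: xs).foldl min v = xs.foldl min x := by
          simp [List.foldl_cons, min_eq_right (le_of_lt hlt)]
        by_cases hx : ∀ y ∈ xs, x ≤ y
        · rw [if_pos hx, hfold, pv_foldl_min_of_le xs x hx, List.idxOf_cons_self]
          simp
        · rw [if_neg hx, hfold]
          have hm : xs.foldl min x < x := pv_foldl_min_of_lt xs x hx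
          rw [List.idxOf_cons_ne xs (ne_of_gt hm)]
          push_cast
          ring
      · rw [if_neg hlt, ih]
        have hvx : v ≤ x := not_lt.mp hlt
        have hfold : (x :: xs).foldl min v = xs.foldl min v := by
          simp [List.foldl_cons, min_eq_left hvx]
        have hcond : (∀ y ∈ x :: xs, v ≤ y) ↔ (∀ y ∈ xs, v ≤ y) := by
          constructor
          · intro h y hy; exact h y (by simp [hy])
          · intro h y hy
            rcases List.mem_cons.mp hy with rfl | hy'
            · exact hvx
            · exact h y hy'
        by_cases hall : ∀ y ∈ xs, v ≤ y
        · rw [if_pos hall, if_pos (hcond.mpr hall)]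
        · rw [if_neg hall, if_neg (fun h => hall (hcond.mp h)), hfold]
          have hm : xs.foldl min v < v := pv_foldl_min_of_lt xs v hall
          rw [List.idxOf_cons_ne xs (ne_of_gt (lt_of_lt_of_le hm hvx))]
          push_cast
          ring

-- Invariant of B's fold: starting from (b, a, some m), the final before ++ after is the full
-- remaining input with the first occurrence of the running minimum withheld.
lemma pv_fold_inv (xs : List Int) : ∀ (b a : List Int) (m : Int),
    (let s := xs.foldl pvStepB (b, a, some m); s.1 ++ s.2.1) =
      if ∀ y ∈ xs, m ≤ y then b ++ a ++ xs
      else b ++ [m] ++ a ++ (xs.eraseIdx (xs.idxOf (xs.foldl min m))) := by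
  induction xs with
  | nil => intro b a m; simp
  | cons x xs ih =>
      intro b a m
      simp only [List.foldl_cons, pvStepB]
      by_cases hlt : x < m
      · rw [if_pos hlt, ih]
        have hcond : ¬ ∀ y ∈ x :: xs, m ≤ y := by
          intro h; exact absurd (h x (by simp)) (not_le.mpr hlt)
        rw [if_neg hcond, min_eq_right (le_of_lt hlt)]
        by_cases hx : ∀ y ∈ xs, x ≤ y
        · rw [if_pos hx, pv_foldl_min_of_le xs x hx, List.idxOf_cons_self]
          simp
        · rw [if_neg hx]
          have hm : xs.foldl min x < x := pv_foldl_min_of_lt xs x hx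
          rw [List.idxOf_cons_ne xs (ne_of_gt hm), List.eraseIdx_cons_succ]
          simp
      · rw [if_neg hlt, ih]
        have hmx : m ≤ x := not_lt.mp hlt
        rw [min_eq_left hmx]
        have hcond : (∀ y ∈ x :: xs, m ≤ y) ↔ (∀ y ∈ xs, m ≤ y) := by
          constructor
          · intro h y hy; exact h y (by simp [hy])
          · intro h y hy
            rcases List.mem_cons.mp hy with rfl | hy'
            · exact hmx
            · exact h y hy'
        by_cases hall : ∀ y ∈ xs, m ≤ y
        · rw [if_pos hall, if_pos (hcond.mpr hall)]
          simp
        · rw [if_neg hall, if_neg (fun h => hall (hcond.mp h))]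
          have hm : xs.foldl min m < m := pv_foldl_min_of_lt xs m hall
          rw [List.idxOf_cons_ne xs (ne_of_gt (lt_of_lt_of_le hm hmx)), List.eraseIdx_cons_succ]
          simp

-- ===== VERDICT (by name: the statement is the Claim_ definition above) =====
theorem remove_smallest2_spec : Claim_equal_remove_smallest2 := by
  intro numbers _
  unfold Spec_remove_smallest2
  match numbers with
  | [] => rfl
  | x :: xs =>
    unfold remove_smallest2 remove_smallest2_alt
    rw [if_neg (by simp)]
    rw [PySem.List.enumerate_cons]
    simp only [List.foldl_cons, pvStepB]
    have e1 : (0 : Int) + 1 = 1 := by norm_num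
    rw [e1]
    -- A's first iteration: min goes from None to 0
    have hget0 : PySem.List.pyGetD (x :: xs) (0 : Int) 0 = x := by
      exact PySem.List.pyGetD_natCast (x :: xs) 0 0
    have hall : ∀ p ∈ PySem.List.enumerate xs 1, PySem.List.pyGetD (x :: xs) p.1 0 = p.2 := by
      intro p hp
      rw [PySem.List.mem_enumerate_iff] at hp
      obtain ⟨k, hk, rfl⟩ := hp
      have : (1 : Int) + (k : Int) = ((k + 1 : Nat) : Int) := by push_cast; ring
      rw [this, PySem.List.pyGetD_natCast]
      simp [List.getD, hk]
    rw [pv_fold_eq_choose (x :: xs) (PySem.List.enumerate xs 1) 0 x hget0 hall]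
    rw [pv_choose_enum xs 1 0 x]
    -- B's first iteration then the invariant
    rw [pv_fold_inv xs [] [] x]
    by_cases hx : ∀ y ∈ xs, x ≤ y
    · rw [if_pos hx, if_pos hx]
      dsimp only
      rw [PySem.List.pop?_zero_cons]
      simp
    · rw [if_neg hx, if_neg hx]
      have hm : xs.foldl min x < x := pv_foldl_min_of_lt xs x hx
      set k := xs.idxOf (xs.foldl min x) with hkdef
      have hmem : xs.foldl min x ∈ xs := by
        rcases PySem.List.foldl_min_mem xs x with he | h
        · exact absurd he (ne_of_lt hm)
        · exact h
      have hk : k < xs.length := List.idxOf_lt_length_of_mem hmem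
      have hcast : (1 : Int) + (k : Int) = ((k + 1 : Nat) : Int) := by push_cast; ring
      rw [hcast]
      dsimp only
      rw [PySem.List.pop?_natCast (x :: xs) (k + 1) (by simpa using Nat.succ_lt_succ hk)]
      dsimp only
      rw [List.eraseIdx_cons_succ]
      simp
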